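-- pv_equiv track=rewrite | github.com/aimagelab/MLLMs-FlowTracker | generation.py | split_list_before_sub
-- ===== SOURCE A (Python) =====
-- def split_list_before_sub(big_list, sub_list):
--     n = len(sub_list)
--
--     for i in range(len(big_list) - n + 1):
--         if big_list[i:i+n] == sub_list:
--             before = big_list[:i]     # before sublist, sub not included
--             sub = big_list[i:i+n]     # sublist itself
--             after = big_list[i+n:]    # after sublist
--             return before, sub, after
--     return None, None, None  # sublist not found
-- ===== SOURCE B (Python) =====
-- def split_list_before_sub(big_list, sub_list):
--     # Peel elements off the front one at a time, accumulating them in `before`,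
--     # and at each step test whether sub_list is a prefix of the remaining suffix.
--     n = len(sub_list)
--     before = []
--     rest = big_list
--     while True:
--         if n <= len(rest) and all(a == b for a, b in zip(rest, sub_list)):
--             return before, list(sub_list), rest[n:]
--         if not rest:
--             return None, None, None
--         before.append(rest[0])
--         rest = rest[1:]
-- ===== Notes on version B (the rewrite author's own statement) =====
-- stated objective: alternative
-- what changed: Replaced A's index loop with per-position slice comparisons by a structural peel-off-the-front recursion that accumulates the prefix and tests 'sub_list is a prefix of the remaining suffix' element-wise via zip, so no index arithmetic or window slices are used.
import Mathlib
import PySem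

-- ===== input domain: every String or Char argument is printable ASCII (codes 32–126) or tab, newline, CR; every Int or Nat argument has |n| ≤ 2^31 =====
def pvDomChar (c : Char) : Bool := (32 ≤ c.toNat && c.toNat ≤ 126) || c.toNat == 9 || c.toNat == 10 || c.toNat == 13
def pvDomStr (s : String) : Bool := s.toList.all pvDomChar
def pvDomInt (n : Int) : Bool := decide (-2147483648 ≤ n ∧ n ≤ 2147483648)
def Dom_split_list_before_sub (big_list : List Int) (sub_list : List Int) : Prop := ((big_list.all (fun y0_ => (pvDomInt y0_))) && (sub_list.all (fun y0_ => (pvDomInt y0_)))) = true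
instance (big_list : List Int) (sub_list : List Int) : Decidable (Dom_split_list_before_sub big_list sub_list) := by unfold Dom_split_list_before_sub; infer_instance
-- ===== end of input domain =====

-- B replaces A's index loop with slice comparisons by a peel-off-the-front recursion
-- that accumulates the prefix and tests an element-wise zip prefix match
-- (objective: alternative decomposition; not faster — the peel step copies the suffix).

-- ===== PORT A =====
-- the 'for i in range(...)' loop with early return: recursion over the index list
def pvAGo (big_list sub_list : List Int) (n : Int) :
    List Int → Option (List Int) × Option (List Int) × Option (List Int)
  | [] => (none, none, none)
  | i :: rest =>
    if PySem.List.slice big_list (some i) (some (i + n)) = sub_list then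
      (some (PySem.List.slice big_list none (some i)),
       some (PySem.List.slice big_list (some i) (some (i + n))),
       some (PySem.List.slice big_list (some (i + n)) none))
    else pvAGo big_list sub_list n rest

def split_list_before_sub (big_list : List Int) (sub_list : List Int) :
    Option (List Int) × Option (List Int) × Option (List Int) :=
  pvAGo big_list sub_list (sub_list.length : Int)
    (PySem.List.pyRange 0 ((big_list.length : Int) - (sub_list.length : Int) + 1) 1)

-- ===== PORT B =====
-- Source B's while-loop as structural recursion on `rest`; the slice rest[n:] with
-- n = len(sub_list) ≥ 0 is exactly List.drop n, and `before.append`/`rest = rest[1:]`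
-- is the accumulator step of the recursion.
def pvBGo (sub : List Int) (n : Nat) (rest before : List Int) :
    Option (List Int) × Option (List Int) × Option (List Int) :=
  if n ≤ rest.length ∧ ((rest.zip sub).all (fun p => p.1 == p.2)) = true then
    (some before, some sub, some (rest.drop n))
  else
    match rest with
    | [] => (none, none, none)
    | x :: rs => pvBGo sub n rs (before ++ [x])
  termination_by rest.length

def split_list_before_sub_alt (big_list : List Int) (sub_list : List Int) :
    Option (List Int) × Option (List Int) × Option (List Int) :=
  pvBGo sub_list sub_list.length big_list []

-- ===== PRECONDITION & SPEC =====
def Spec_split_list_before_sub (big_list : List Int) (sub_list : List Int) (out : Option (List Int) × Option (List Int) × Option (List Int)) : Prop := out = split_list_before_sub_alt big_list sub_list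
instance (big_list : List Int) (sub_list : List Int) (out : Option (List Int) × Option (List Int) × Option (List Int)) : Decidable (Spec_split_list_before_sub big_list sub_list out) := by unfold Spec_split_list_before_sub; infer_instance

-- ===== CLAIM (what is proved, stated in full; the proofs are below) =====
def Claim_equal_split_list_before_sub : Prop := ∀ (big_list : List Int) (sub_list : List Int), Dom_split_list_before_sub big_list sub_list → Spec_split_list_before_sub big_list sub_list (split_list_before_sub big_list sub_list)

-- ===== LEMMAS AND PROOFS =====

-- the zip-all test is a prefix test once the length guard holds
lemma pv_prefix (sub : List Int) : ∀ (rest : List Int), sub.length ≤ rest.length →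
    (((rest.zip sub).all (fun p => p.1 == p.2)) = true ↔ rest.take sub.length = sub) := by
  induction sub with
  | nil => intro rest _; simp
  | cons b bs ih =>
    intro rest hlen
    cases rest with
    | nil => simp at hlen
    | cons a as =>
      simp only [List.zip_cons_cons, List.all_cons, List.length_cons, List.take_succ_cons,
        Bool.and_eq_true, beq_iff_eq, List.cons.injEq]
      constructor
      · rintro ⟨h1, h2⟩
        exact ⟨h1, (ih as (by simpa using hlen)).mp h2⟩
      · rintro ⟨h1, h2⟩
        exact ⟨h1, (ih as (by simpa using hlen)).mpr h2⟩

-- once the suffix is shorter than the pattern, B's loop returns (none, none, none)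
lemma pv_none (sub : List Int) : ∀ (rest before : List Int), rest.length < sub.length →
    pvBGo sub sub.length rest before = (none, none, none) := by
  intro rest
  induction rest with
  | nil =>
    intro before h
    rw [pvBGo, if_neg (by rintro ⟨h1, _⟩; omega)]
  | cons x rs ih =>
    intro before h
    rw [pvBGo, if_neg (by rintro ⟨h1, _⟩; omega)]
    exact ih _ (by simp at h ⊢; omega)

-- the two loops agree: A at index list i, i+1, …, i+k-1 vs B at suffix big.drop i
lemma pv_loop (big sub : List Int) (hs : 1 ≤ sub.length) (hle : sub.length ≤ big.length) :
    ∀ (k i : Nat), i + k = big.length + 1 - sub.length →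
    pvAGo big sub (sub.length : Int) ((List.range k).map (fun j : Nat => ((i : Int) + (j : Int))))
      = pvBGo sub sub.length (big.drop i) (big.take i) := by
  intro k
  induction k with
  | zero =>
    intro i hi
    have hlen : (big.drop i).length < sub.length := by
      simp [List.length_drop]; omega
    simp only [List.range_zero, List.map_nil, pvAGo]
    exact (pv_none sub _ _ hlen).symm
  | succ k ih =>
    intro i hi
    have hin : i + sub.length ≤ big.length := by omega
    rw [List.range_succ_eq_map, List.map_cons, List.map_map]
    have hmap : ((fun j : Nat => ((i : Int) + (j : Int))) ∘ Nat.succ)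
        = fun j : Nat => (((i+1 : Nat) : Int) + (j : Int)) := by
      funext j; simp [Nat.succ_eq_add_one]; ring
    rw [hmap]
    have hslice : PySem.List.slice big (some (i : Int)) (some ((i : Int) + (sub.length : Int)))
        = (big.drop i).take sub.length := PySem.List.slice_natCast_add ..
    have hrlen : sub.length ≤ (big.drop i).length := by simp [List.length_drop]; omega
    simp only [pvAGo, Nat.cast_zero, add_zero, hslice]
    rw [pvBGo.eq_def]
    by_cases hm : (big.drop i).take sub.length = sub
    · have hz : ((big.drop i).zip sub).all (fun p => p.1 == p.2) = true :=
        (pv_prefix sub _ hrlen).mpr hm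
      rw [if_pos hm, if_pos ⟨hrlen, hz⟩]
      refine congrArg₂ Prod.mk ?_ (congrArg₂ Prod.mk ?_ ?_)
      · rw [PySem.List.slice_to_natCast]
      · exact congrArg some hm
      · have hc : (i : Int) + (sub.length : Int) = ((i + sub.length : Nat) : Int) := by
          push_cast; ring
        rw [hc, PySem.List.slice_from_natCast, List.drop_drop]
    · have hz : ¬ (sub.length ≤ (big.drop i).length ∧
          ((big.drop i).zip sub).all (fun p => p.1 == p.2) = true) := by
        rintro ⟨h1, h2⟩; exact hm ((pv_prefix sub _ h1).mp h2)
      have hi' : i < big.length := by omega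
      have hdrop : big.drop i = big[i] :: big.drop (i+1) := List.drop_eq_getElem_cons hi'
      rw [if_neg hm, if_neg hz, hdrop]
      show pvAGo big sub (sub.length : Int)
          ((List.range k).map (fun j : Nat => (((i+1 : Nat) : Int) + (j : Int))))
        = pvBGo sub sub.length (big.drop (i+1)) (big.take i ++ [big[i]])
      have htake : big.take i ++ [big[i]] = big.take (i+1) := by
        rw [List.take_add_one, List.getElem?_eq_getElem hi']; rfl
      rw [htake]
      exact ih (i+1) (by omega)

theorem pv_main (big sub : List Int) :
    split_list_before_sub big sub = split_list_before_sub_alt big sub := by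
  unfold split_list_before_sub split_list_before_sub_alt
  by_cases hs : sub = []
  · -- empty pattern: both return (some [], some [], some big) at the first index/step
    subst hs
    rw [PySem.List.pyRange_one_cons (by simp), pvBGo.eq_def]
    have h0 : PySem.List.slice big (some (0:Int)) (some (0:Int)) = [] := by
      simpa using PySem.List.slice_natCast_add (xs := big) (j := 0) (n := 0)
    have h1 : PySem.List.slice big none (some (0:Int)) = [] := by
      simpa using PySem.List.slice_to_natCast (xs := big) (b := 0)
    have h2 : PySem.List.slice big (some (0:Int)) none = big := by
      simpa using PySem.List.slice_from_natCast (xs := big) (a := 0)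
    simp [pvAGo, h0, h1, h2]
  · have hs1 : 1 ≤ sub.length := by
      cases sub with | nil => simp at hs | cons a as => simp
    by_cases hnm : big.length < sub.length
    · -- pattern longer than text: A's range is empty, B peels down to [] and returns none
      rw [PySem.List.pyRange_one_eq_nil (by omega)]
      simp only [pvAGo]
      exact (pv_none sub big [] hnm).symm
    · rw [PySem.List.pyRange_one]
      have hk : ((big.length : Int) - (sub.length : Int) + 1 - 0).toNat
          = big.length + 1 - sub.length := by omega
      rw [hk]
      have := pv_loop big sub hs1 (by omega) (big.length + 1 - sub.length) 0 (by omega)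
      simpa using this

-- ===== VERDICT (by name: the statement is the Claim_ definition above) =====
theorem split_list_before_sub_spec : Claim_equal_split_list_before_sub := by
  intro big sub _
  unfold Spec_split_list_before_sub
  exact pv_main big sub
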